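-- pv_equiv track=rewrite | github.com/pypi-data/pypi-mirror-385 | packages/fmorg/fmorg-1.0.0.tar.gz/fmorg-1.0.0/fmorg/analyzer_original_backup.py | _is_meaningful_word
-- ===== SOURCE A (Python) =====
-- def _is_meaningful_word(token: str) -> bool:
--     """Check if token appears to be a meaningful English word."""
--     # Basic heuristics for meaningful words
--     if len(token) < 2:
--         return False
--
--     # Contains vowels (common in English)
--     if not any(char.lower() in 'aeiou' for char in token):
--         return False
--
--     # Not all numbers or special characters
--     if token.isdigit() or not any(char.isalpha() for char in token):
--         return False
--
--     return True
-- ===== SOURCE B (Python) =====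
-- def _is_meaningful_word(token: str) -> bool:
--     # One explicit pass: a vowel guarantees an alphabetic, non-digit char,
--     # so the isdigit/isalpha checks of the original are redundant.
--     has_vowel = False
--     for char in token:
--         if char.lower() in 'aeiou':
--             has_vowel = True
--             break
--     return len(token) >= 2 and has_vowel
-- ===== Notes on version B (the rewrite author's own statement) =====
-- stated objective: simpler
-- what changed: B drops the redundant isdigit/isalpha guards (a vowel already implies an alphabetic non-digit char) and replaces the three separate any()/string scans with one explicit loop maintaining has_vowel with an early break.
import Mathlib
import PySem

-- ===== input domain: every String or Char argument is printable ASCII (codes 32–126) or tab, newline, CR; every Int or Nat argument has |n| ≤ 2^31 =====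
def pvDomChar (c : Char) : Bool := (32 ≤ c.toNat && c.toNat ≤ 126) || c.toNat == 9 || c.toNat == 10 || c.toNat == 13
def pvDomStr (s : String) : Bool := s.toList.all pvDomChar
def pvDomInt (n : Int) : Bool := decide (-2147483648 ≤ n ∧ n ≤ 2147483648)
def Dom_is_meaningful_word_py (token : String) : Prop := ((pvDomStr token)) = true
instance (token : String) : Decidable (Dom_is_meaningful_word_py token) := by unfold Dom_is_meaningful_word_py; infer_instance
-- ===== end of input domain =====

-- B: one explicit pass keeping has_vowel (early break); the isdigit/isalpha guards of A are redundant given the vowel check.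
-- ===== PORT A =====
-- char.lower() in 'aeiou': for a single char, substring membership = char membership (exact)
def pvIsVowel (c : Char) : Bool := ['a', 'e', 'i', 'o', 'u'].contains (PySem.Chars.lowerChar c)

def is_meaningful_word_py (token : String) : Bool :=
  if PySem.Str.len token < 2 then false
  else if !(token.toList.any pvIsVowel) then false
  else if PySem.Str.strIsdigit token || !(token.toList.any PySem.Chars.isalpha) then false
  else true

-- ===== PORT B =====
-- the for-loop with early break of Source B
def pvHasVowelLoop : List Char → Bool
  | [] => false
  | c :: rest => if pvIsVowel c then true else pvHasVowelLoop rest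

def is_meaningful_word_py_alt (token : String) : Bool :=
  decide (2 ≤ PySem.Str.len token) && pvHasVowelLoop token.toList

-- ===== PRECONDITION & SPEC =====
def Spec_is_meaningful_word_py (token : String) (out : Bool) : Prop := out = is_meaningful_word_py_alt token
instance (token : String) (out : Bool) : Decidable (Spec_is_meaningful_word_py token out) := by unfold Spec_is_meaningful_word_py; infer_instance

-- ===== CLAIM (what is proved, stated in full; the proofs are below) =====
def Claim_equal_is_meaningful_word_py : Prop := ∀ (token : String), Dom_is_meaningful_word_py token → Spec_is_meaningful_word_py token (is_meaningful_word_py token)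

-- ===== LEMMAS AND PROOFS =====
theorem pvHasVowelLoop_eq (l : List Char) : pvHasVowelLoop l = l.any pvIsVowel := by
  induction l with
  | nil => rfl
  | cons c rest ih => by_cases h : pvIsVowel c <;> simp [pvHasVowelLoop, h, ih]

theorem pvVowel_alpha_not_digit (c : Char) (h : pvIsVowel c = true) :
    PySem.Chars.isalpha c = true ∧ PySem.Chars.isdigit c = false := by
  unfold pvIsVowel PySem.Chars.lowerChar at h
  by_cases hu : PySem.Chars.isupper c = true
  · refine ⟨by simp [PySem.Chars.isalpha, hu], ?_⟩
    simp [PySem.Chars.isupper, Char.le_def, UInt32.le_iff_toNat_le] at hu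
    simp [PySem.Chars.isdigit, Char.le_def, UInt32.le_iff_toNat_le]
    omega
  · simp [hu] at h
    rcases h with h | h | h | h | h <;> subst h <;> decide

-- ===== VERDICT (by name: the statement is the Claim_ definition above) =====
theorem is_meaningful_word_py_spec : Claim_equal_is_meaningful_word_py := by
  intro token _
  unfold Spec_is_meaningful_word_py is_meaningful_word_py is_meaningful_word_py_alt
  rw [pvHasVowelLoop_eq]
  by_cases h2 : PySem.Str.len token < 2
  · have hb : decide (2 ≤ PySem.Str.len token) = false := decide_eq_false (by omega)
    rw [if_pos h2, hb]
    simp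
  · have hb : decide (2 ≤ PySem.Str.len token) = true := decide_eq_true (by omega)
    rw [if_neg h2, hb]
    cases hv : token.toList.any pvIsVowel with
    | false => simp
    | true =>
      obtain ⟨c, hc, hcv⟩ := List.any_eq_true.mp hv
      obtain ⟨ha, hd⟩ := pvVowel_alpha_not_digit c hcv
      have halpha : token.toList.any PySem.Chars.isalpha = true :=
        List.any_eq_true.mpr ⟨c, hc, ha⟩
      have hdig : PySem.Chars.strIsdigit token.toList = false := by
        simp [PySem.Chars.strIsdigit]
        intro _
        exact ⟨c, hc, by simp [hd]⟩
      simp [halpha, hdig]
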